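-- pv_equiv track=rewrite | github.com/Athjon/Analog_DesignAuto | util/gen_action_space.py | _process_mask
-- ===== SOURCE A (Python) =====
-- import copy
--
-- def _process_mask(original_devices, mask_dict):
--     """处理设备掩码逻辑"""
--     processed = copy.deepcopy(original_devices)
--
--     # 移除特殊约束部分
--     mask_dict = {k: v for k, v in (mask_dict or {}).items()
--                 if k != 'Other_Constrain'}
--
--     # 应用掩码规则
--     for mask_type, devices in mask_dict.items():
--         for device in devices:
--             if device.endswith('_Match'):
--                 # 替换匹配设备
--                 target = device.replace('_Match', '')
--                 processed = [d if d != target else device for d in processed]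
--             else:
--                 # 移除被屏蔽设备
--                 processed = [d for d in processed if d != device]
--
--     return processed
-- ===== SOURCE B (Python) =====
-- def _process_mask(original_devices, mask_dict):
--     # Flatten the mask rules (skipping 'Other_Constrain') in order.
--     rules = []
--     for mask_type, devices in (mask_dict or {}).items():
--         if mask_type != 'Other_Constrain':
--             rules.extend(devices)
--     # Build, in one backward pass over the rules, the final outcome of each
--     # affected device name: maps name -> final name, or None if removed.
--     outcome = {}
--     for device in reversed(rules):
--         if device.endswith('_Match'):
--             target = device.replace('_Match', '')
--             outcome[target] = outcome.get(device, device)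
--         else:
--             outcome[device] = None
--     # Single pass over the device list.
--     result = []
--     for d in original_devices:
--         v = outcome.get(d, d)
--         if v is not None:
--             result.append(v)
--     return result
-- ===== Notes on version B (the rewrite author's own statement) =====
-- stated objective: faster
-- what changed: Instead of rewriting the whole device list once per mask rule (O(N*M)), B folds the rules backwards into one dict mapping each affected name to its final outcome (renamed name or removal), then makes a single pass over the device list.
import Mathlib
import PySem

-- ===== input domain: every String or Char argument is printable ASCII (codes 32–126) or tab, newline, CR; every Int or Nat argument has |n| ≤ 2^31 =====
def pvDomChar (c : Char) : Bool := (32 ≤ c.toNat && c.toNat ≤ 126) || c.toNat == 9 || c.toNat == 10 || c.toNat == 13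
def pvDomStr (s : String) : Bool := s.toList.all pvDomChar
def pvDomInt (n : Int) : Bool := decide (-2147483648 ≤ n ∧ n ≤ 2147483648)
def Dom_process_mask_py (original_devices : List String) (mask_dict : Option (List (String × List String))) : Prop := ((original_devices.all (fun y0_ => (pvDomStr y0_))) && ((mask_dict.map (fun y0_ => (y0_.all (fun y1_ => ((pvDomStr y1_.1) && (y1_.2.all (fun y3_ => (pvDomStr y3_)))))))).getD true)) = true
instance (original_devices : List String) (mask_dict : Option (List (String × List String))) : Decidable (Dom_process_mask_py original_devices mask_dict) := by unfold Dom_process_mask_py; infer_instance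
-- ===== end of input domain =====

-- B replaces A's per-rule rewrite of the whole list by one backward fold of the
-- rules into a name -> final-outcome dict plus a single pass over the device list.
-- ===== PORT A =====
def pvStep (processed : List String) (device : String) : List String :=
  if PySem.Str.endswith device "_Match" then
    -- processed = [d if d != target else device for d in processed]
    processed.map (fun d => if d ≠ PySem.Str.replace device "_Match" "" then d else device)
  else
    -- processed = [d for d in processed if d != device]
    processed.filter (fun d => d ≠ device)

def process_mask_py (original_devices : List String) (mask_dict : Option (List (String × List String))) : List String :=
  -- processed = copy.deepcopy(original_devices)
  let processed := original_devices
  -- mask_dict = {k: v for k, v in (mask_dict or {}).items() if k != 'Other_Constrain'}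
  let md := ((PySem.Dict.ofList (mask_dict.getD [])).items).filter (fun kv => kv.1 ≠ "Other_Constrain")
  -- for mask_type, devices in mask_dict.items(): for device in devices: …
  md.foldl (fun processed kv => kv.2.foldl pvStep processed) processed

-- ===== PORT B =====
def pvRules (mask_dict : Option (List (String × List String))) : List String :=
  ((PySem.Dict.ofList (mask_dict.getD [])).items).foldl
    (fun rules kv => if kv.1 ≠ "Other_Constrain" then rules ++ kv.2 else rules) []

def pvOutcome (rules : List String) : PySem.Dict String (Option String) :=
  rules.reverse.foldl
    (fun out device =>
      if PySem.Str.endswith device "_Match" then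
        out.insert (PySem.Str.replace device "_Match" "") (out.getD device (some device))
      else
        out.insert device none)
    PySem.Dict.empty

def process_mask_py_alt (original_devices : List String) (mask_dict : Option (List (String × List String))) : List String :=
  let outcome := pvOutcome (pvRules mask_dict)
  original_devices.foldl
    (fun result d =>
      match outcome.getD d (some d) with
      | some v => result ++ [v]
      | none => result)
    []

-- ===== PRECONDITION & SPEC =====
def Spec_process_mask_py (original_devices : List String) (mask_dict : Option (List (String × List String))) (out : List String) : Prop := out = process_mask_py_alt original_devices mask_dict
instance (original_devices : List String) (mask_dict : Option (List (String × List String))) (out : List String) : Decidable (Spec_process_mask_py original_devices mask_dict out) := by unfold Spec_process_mask_py; infer_instance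

-- ===== CLAIM (what is proved, stated in full; the proofs are below) =====
def Claim_equal_process_mask_py : Prop := ∀ (original_devices : List String) (mask_dict : Option (List (String × List String))), Dom_process_mask_py original_devices mask_dict → Spec_process_mask_py original_devices mask_dict (process_mask_py original_devices mask_dict)

-- ===== LEMMAS AND PROOFS =====
-- the elementwise effect of the whole rule sequence on one device name
def pvSem (rules : List String) (x : String) : Option String :=
  match rules with
  | [] => some x
  | r :: rs =>
    if PySem.Str.endswith r "_Match" then
      if x = PySem.Str.replace r "_Match" "" then pvSem rs r else pvSem rs x
    else
      if x = r then none else pvSem rs x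

theorem pvStep_foldl_eq_filterMap (rules : List String) (xs : List String) :
    rules.foldl pvStep xs = xs.filterMap (pvSem rules) := by
  induction rules generalizing xs with
  | nil => simp [pvSem]
  | cons r rs ih =>
    simp only [List.foldl_cons, ih, pvStep]
    by_cases h : PySem.Str.endswith r "_Match" = true
    · rw [if_pos h, List.filterMap_map]
      apply List.filterMap_congr
      intro x _
      by_cases hx : x = PySem.Str.replace r "_Match" "" <;>
        simp only [pvSem, h, hx] <;> simp [hx]
    · rw [if_neg h, List.filterMap_filter]
      apply List.filterMap_congr
      intro x _
      by_cases hx : x = r <;>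
        simp only [pvSem, h, hx] <;> simp [hx]

theorem pvOutcome_cons (r : String) (rs : List String) :
    pvOutcome (r :: rs) =
      (if PySem.Str.endswith r "_Match" = true then
        (pvOutcome rs).insert (PySem.Str.replace r "_Match" "")
          ((pvOutcome rs).getD r (some r))
      else (pvOutcome rs).insert r none) := by
  unfold pvOutcome
  rw [List.reverse_cons, List.foldl_append]
  simp only [List.foldl_cons, List.foldl_nil]

theorem pvOutcome_getD (rules : List String) (x : String) :
    (pvOutcome rules).getD x (some x) = pvSem rules x := by
  induction rules generalizing x with
  | nil => simp [pvOutcome, pvSem, PySem.Dict.getD_empty]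
  | cons r rs ih =>
    rw [pvOutcome_cons]
    by_cases h : PySem.Str.endswith r "_Match" = true
    · rw [if_pos h, PySem.Dict.getD_insert]
      by_cases hx : x = PySem.Str.replace r "_Match" "" <;>
        simp only [pvSem, h, hx, ite_false] <;> simp [ih]
    · rw [if_neg h, PySem.Dict.getD_insert]
      by_cases hx : x = r <;>
        simp only [pvSem, h, hx] <;> simp [ih]

theorem pvFoldl_match_eq_filterMap (g : String → Option String) (l acc : List String) :
    l.foldl (fun result d => match g d with
      | some v => result ++ [v]
      | none => result) acc = acc ++ l.filterMap g := by
  induction l generalizing acc with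
  | nil => simp
  | cons d l ih =>
    simp only [List.foldl_cons, ih, List.filterMap_cons]
    cases h : g d <;> simp

theorem pvRules_eq (mask_dict : Option (List (String × List String))) :
    pvRules mask_dict =
      (((PySem.Dict.ofList (mask_dict.getD [])).items).filter
        (fun kv => kv.1 ≠ "Other_Constrain")).flatMap Prod.snd := by
  unfold pvRules
  rw [PySem.List.foldl_ite_eq_foldl_filter
        (p := fun kv => kv.1 ≠ "Other_Constrain")
        (f := fun rules (kv : String × List String) => rules ++ kv.2),
      PySem.List.foldl_append_eq_flatMap]
  simp

theorem pvNested_foldl (items : List (String × List String)) (init : List String) :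
    items.foldl (fun processed kv => kv.2.foldl pvStep processed) init =
      (items.flatMap Prod.snd).foldl pvStep init := by
  induction items generalizing init with
  | nil => rfl
  | cons kv items ih => simp [List.foldl_append, ih]


-- ===== VERDICT (by name: the statement is the Claim_ definition above) =====
theorem process_mask_py_spec : Claim_equal_process_mask_py := by
  intro original_devices mask_dict _
  unfold Spec_process_mask_py process_mask_py process_mask_py_alt
  rw [pvNested_foldl, pvStep_foldl_eq_filterMap, pvFoldl_match_eq_filterMap, pvRules_eq]
  simp only [List.nil_append]
  apply List.filterMap_congr
  intro d _
  rw [pvOutcome_getD]
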